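-- pv_equiv track=rewrite | github.com/metanova-labs/nova | utils/nanobodies.py | max_di_repeat_pairs
-- ===== SOURCE A (Python) =====
-- def max_di_repeat_pairs(s: str) -> int:
--     """
--     Detect strongest ABABAB... repeats.
--     Returns the max number of AB pairs in a contiguous ABAB... region.
--     Example: "GSGSGS" -> "GS" repeated 3 times => 3 pairs.
--     """
--     best = 0
--     n = len(s)
--
--     for i in range(n - 3):
--         a, b = s[i], s[i + 1]
--         if a == b:
--             continue  # skip AA repeats; handled by homopolymer
--         pairs = 1
--         j = i + 2
--         while j + 1 < n and s[j] == a and s[j + 1] == b: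
--             pairs += 1
--             j += 2
--         if pairs > best:
--             best = pairs
--     return best
-- ===== SOURCE B (Python) =====
-- def max_di_repeat_pairs(s: str) -> int:
--     """Right-to-left DP: P[i] = number of AB pairs starting at i, with
--     P[i] = 1 + P[i+2] when the period-2 pattern continues; the answer is
--     the max P[i] over valid starts."""
--     n = len(s)
--     P = [1] * n
--     for i in reversed(range(n - 3)):
--         if s[i + 2] == s[i] and s[i + 3] == s[i + 1]:
--             P[i] = 1 + P[i + 2]
--     best = 0
--     for i in range(n - 3):
--         if s[i] != s[i + 1] and P[i] > best:
--             best = P[i]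
--     return best
-- ===== Notes on version B (the rewrite author's own statement) =====
-- stated objective: alternative
-- what changed: Replaces the restart-at-every-index scan (inner while loop per start) with a right-to-left dynamic program P[i] = 1 + P[i+2] when the period-2 pattern continues, followed by one max pass; A's quadratic worst case needs long alternating runs that typical inputs lack, so no speed is claimed.
import Mathlib
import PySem

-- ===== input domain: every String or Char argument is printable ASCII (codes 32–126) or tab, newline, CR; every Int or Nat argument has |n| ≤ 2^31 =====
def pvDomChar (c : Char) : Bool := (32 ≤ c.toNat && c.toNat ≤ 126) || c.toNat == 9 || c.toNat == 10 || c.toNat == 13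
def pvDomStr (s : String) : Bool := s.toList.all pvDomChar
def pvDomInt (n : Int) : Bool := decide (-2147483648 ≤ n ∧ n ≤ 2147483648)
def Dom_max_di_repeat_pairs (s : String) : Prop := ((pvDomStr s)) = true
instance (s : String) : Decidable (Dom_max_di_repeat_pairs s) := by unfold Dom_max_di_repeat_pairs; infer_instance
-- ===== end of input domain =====

-- B replaces A's restart-per-index scan by a right-to-left DP on period-2 run
-- lengths (P[i] = 1 + P[i+2] when the pattern continues), then one max pass
-- (an alternative single-pass structure; no speed is claimed).

-- ===== PORT A =====
-- inner `while j + 1 < n and s[j] == a and s[j + 1] == b: pairs += 1; j += 2`,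
-- returning the number of extra pairs added after the initial `pairs = 1`.
def pvLoopA (cs : List Char) (a b : Char) (j : Nat) : Nat :=
  if h : j + 1 < cs.length ∧ cs.getD j default = a ∧ cs.getD (j + 1) default = b then
    1 + pvLoopA cs a b (j + 2)
  else
    0
termination_by cs.length - j
decreasing_by omega

def max_di_repeat_pairs (s : String) : Int :=
  let cs := s.toList
  let n := cs.length
  -- all counts are nonnegative, so the fold runs over Nat and is cast at the end
  Int.ofNat <|
    (List.range (n - 3)).foldl (fun best i =>
      let a := cs.getD i default
      let b := cs.getD (i + 1) default
      if a = b then best                         -- `continue`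
      else
        let pairs := 1 + pvLoopA cs a b (i + 2)  -- `pairs = 1` plus the while loop
        if pairs > best then pairs else best) 0

-- ===== PORT B =====
def max_di_repeat_pairs_alt (s : String) : Int :=
  let cs := s.toList
  let n := cs.length
  -- `P = [1] * n` then `for i in reversed(range(n - 3)): ...` mutating P in place
  let P := ((List.range (n - 3)).reverse).foldl (fun P i =>
      if cs.getD (i + 2) default = cs.getD i default ∧
         cs.getD (i + 3) default = cs.getD (i + 1) default then
        P.set i (1 + P.getD (i + 2) 0)
      else P)
    (List.replicate n 1)
  Int.ofNat <|
    (List.range (n - 3)).foldl (fun best i =>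
      if cs.getD i default ≠ cs.getD (i + 1) default ∧ P.getD i 0 > best then P.getD i 0
      else best) 0

-- ===== PRECONDITION & SPEC =====
def Spec_max_di_repeat_pairs (s : String) (out : Int) : Prop := out = max_di_repeat_pairs_alt s
instance (s : String) (out : Int) : Decidable (Spec_max_di_repeat_pairs s out) := by unfold Spec_max_di_repeat_pairs; infer_instance

-- ===== CLAIM (what is proved, stated in full; the proofs are below) =====
def Claim_equal_max_di_repeat_pairs : Prop := ∀ (s : String), Dom_max_di_repeat_pairs s → Spec_max_di_repeat_pairs s (max_di_repeat_pairs s)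

-- ===== LEMMAS AND PROOFS =====

-- pairs counted by A when starting at index k (the `1` plus the while loop)
def pvQ (cs : List Char) (k : Nat) : Nat :=
  1 + pvLoopA cs (cs.getD k default) (cs.getD (k + 1) default) (k + 2)

lemma pvQ_rec (cs : List Char) (k : Nat) :
    pvQ cs k =
      if k + 2 + 1 < cs.length ∧ cs.getD (k + 2) default = cs.getD k default ∧
         cs.getD (k + 2 + 1) default = cs.getD (k + 1) default then
        1 + pvQ cs (k + 2)
      else 1 := by
  unfold pvQ
  rw [pvLoopA]
  split_ifs with h
  · rcases h with ⟨hl, ha, hb⟩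
    rw [ha, hb]
  · rfl

-- invariant of B's right-to-left DP fold: after processing indices m-1 … 0,
-- every entry of P equals the pair count pvQ of A's inner loop
lemma pv_foldP_inv (cs : List Char) :
    ∀ (m : Nat) (P : List Nat), P.length = cs.length → m + 3 ≤ cs.length →
      (∀ k, k < m → k < cs.length → P.getD k 0 = 1) →
      (∀ k, m ≤ k → k < cs.length → P.getD k 0 = pvQ cs k) →
      ∀ k, k < cs.length →
        (((List.range m).reverse).foldl (fun P i =>
            if cs.getD (i + 2) default = cs.getD i default ∧
               cs.getD (i + 3) default = cs.getD (i + 1) default then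
              P.set i (1 + P.getD (i + 2) 0)
            else P) P).getD k 0 = pvQ cs k := by
  intro m
  induction m with
  | zero =>
    intro P hlen _ _ hup k hk
    simpa using hup k (Nat.zero_le k) hk
  | succ m ih =>
    intro P hlen hm hlow hup k hk
    rw [List.range_succ, List.reverse_append, List.reverse_singleton, List.singleton_append,
      List.foldl_cons]
    set P' := (if cs.getD (m + 2) default = cs.getD m default ∧
        cs.getD (m + 3) default = cs.getD (m + 1) default then
        P.set m (1 + P.getD (m + 2) 0) else P) with hP'
    have hlen' : P'.length = cs.length := by
      rw [hP']; split_ifs <;> simp [hlen]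
    have hne : ∀ j, j ≠ m → P'.getD j 0 = P.getD j 0 := by
      intro j hj
      rw [hP']; split_ifs with hc
      · rw [List.getD_eq_getElem?_getD, List.getElem?_set_ne (Ne.symm hj),
          ← List.getD_eq_getElem?_getD]
      · rfl
    have hPm : P.getD m 0 = 1 := hlow m (by omega) (by omega)
    have hm' : P'.getD m 0 = pvQ cs m := by
      rw [pvQ_rec, hP']
      split_ifs with hc h2 h2
      · rw [List.getD_eq_getElem?_getD, List.getElem?_set_self (by omega)]
        simp only [Option.getD_some]
        rw [hup (m + 2) (by omega) (by omega)]
      · exact absurd ⟨by omega, hc.1, hc.2⟩ h2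
      · exact absurd ⟨h2.2.1, h2.2.2⟩ hc
      · exact hPm
    refine ih P' hlen' (by omega) ?_ ?_ k hk
    · intro j hj hj'
      rw [hne j (by omega)]; exact hlow j (by omega) hj'
    · intro j hj hj'
      rcases Nat.eq_or_lt_of_le hj with h | h
      · rw [← h]; exact hm'
      · rw [hne j (by omega)]; exact hup j (by omega) hj'

-- the two Nat-valued folds agree
lemma pv_main (cs : List Char) :
    (List.range (cs.length - 3)).foldl (fun best i =>
        if cs.getD i default = cs.getD (i + 1) default then best
        else
          if 1 + pvLoopA cs (cs.getD i default) (cs.getD (i + 1) default) (i + 2) > best then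
            1 + pvLoopA cs (cs.getD i default) (cs.getD (i + 1) default) (i + 2)
          else best) 0 =
    (List.range (cs.length - 3)).foldl (fun best i =>
        if cs.getD i default ≠ cs.getD (i + 1) default ∧
           (((List.range (cs.length - 3)).reverse).foldl (fun P i =>
              if cs.getD (i + 2) default = cs.getD i default ∧
                 cs.getD (i + 3) default = cs.getD (i + 1) default then
                P.set i (1 + P.getD (i + 2) 0)
              else P) (List.replicate cs.length 1)).getD i 0 > best then
          (((List.range (cs.length - 3)).reverse).foldl (fun P i =>
              if cs.getD (i + 2) default = cs.getD i default ∧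
                 cs.getD (i + 3) default = cs.getD (i + 1) default then
                P.set i (1 + P.getD (i + 2) 0)
              else P) (List.replicate cs.length 1)).getD i 0
        else best) 0 := by
  rcases Nat.lt_or_ge cs.length 3 with h3 | h3
  · have h0 : cs.length - 3 = 0 := by omega
    rw [h0]; rfl
  · have hP : ∀ k, k < cs.length →
        (((List.range (cs.length - 3)).reverse).foldl (fun P i =>
            if cs.getD (i + 2) default = cs.getD i default ∧
               cs.getD (i + 3) default = cs.getD (i + 1) default then
              P.set i (1 + P.getD (i + 2) 0)
            else P) (List.replicate cs.length 1)).getD k 0 = pvQ cs k := by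
      refine pv_foldP_inv cs (cs.length - 3) (List.replicate cs.length 1) (by simp)
        (by omega) ?_ ?_
      · intro k _ hk
        simp [List.getD_eq_getElem?_getD, hk]
      · intro k hk hk'
        rw [pvQ_rec, if_neg (by rintro ⟨hl, -, -⟩; omega)]
        simp [List.getD_eq_getElem?_getD, hk']
    refine PySem.List.foldl_congr_mem _ _ _ _ ?_
    intro best i hi
    have hi' : i < cs.length - 3 := List.mem_range.mp hi
    rw [hP i (by omega)]
    simp only [pvQ]
    split_ifs <;> first | rfl | tauto

-- ===== VERDICT (by name: the statement is the Claim_ definition above) =====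
theorem max_di_repeat_pairs_spec : Claim_equal_max_di_repeat_pairs := by
  intro s _
  unfold Spec_max_di_repeat_pairs max_di_repeat_pairs max_di_repeat_pairs_alt
  exact congrArg Int.ofNat (pv_main s.toList)
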